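-- pv_equiv track=rewrite | github.com/Nattapong-top/Learning-Python | Python101_Pythonic/07-String-Processing/ex07_02_Escape_Char._&_String_Methods_00.py | contains2
-- ===== SOURCE A (Python) =====
-- def contains2(s:str, w:str):
--     s = s.lower() ; w = w.lower()
--     delimiters = '''" ' / \ , . : ; ( ) [ ] { }'''
--     new_s = ''
--     for c in s:
--         if c in delimiters:
--             new_s += c.replace(c,' ')
--         else:
--             new_s += c
--     list_s = new_s.split()
--     return w in list_s
-- ===== SOURCE B (Python) =====
-- DELIMS = set('"\'/\\,.:;()[]{}')
--
-- def contains2(s, w):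
--     # Single streaming pass: compare each maximal delimiter-free run against w,
--     # instead of building a normalized copy of s, splitting it and searching a list.
--     w = w.lower()
--     cur = ''
--     for c in s.lower():
--         if c in DELIMS or c.isspace():
--             if cur and cur == w:
--                 return True
--             cur = ''
--         else:
--             cur += c
--     return bool(cur) and cur == w
-- ===== Notes on version B (the rewrite author's own statement) =====
-- stated objective: alternative
-- what changed: B does one streaming pass comparing each maximal delimiter-free run of the lowercased string against w (early-returning on a match), instead of A's building a normalized copy of s, splitting it into a token list and testing list membership.
import Mathlib
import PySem

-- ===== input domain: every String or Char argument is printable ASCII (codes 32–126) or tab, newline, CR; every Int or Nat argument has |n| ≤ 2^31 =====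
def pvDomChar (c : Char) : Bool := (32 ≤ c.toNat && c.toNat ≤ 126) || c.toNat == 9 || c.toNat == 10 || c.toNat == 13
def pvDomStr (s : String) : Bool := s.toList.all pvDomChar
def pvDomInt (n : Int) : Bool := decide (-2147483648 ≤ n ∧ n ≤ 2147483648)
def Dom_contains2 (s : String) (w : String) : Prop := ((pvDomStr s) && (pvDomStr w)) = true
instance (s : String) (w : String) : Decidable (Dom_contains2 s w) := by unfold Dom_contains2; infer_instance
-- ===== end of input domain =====

-- B replaces A's normalize-copy + split + list-membership with one streaming pass that
-- compares each maximal delimiter-free run of s against w directly (alternative decomposition).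

-- ===== PORT A =====
-- the delimiters string literal of A: '" \' / \ , . : ; ( ) [ ] { }' (spaces included)
def pvDelims : List Char := "\" ' / \\ , . : ; ( ) [ ] { }".toList

def contains2 (s : String) (w : String) : Bool :=
  let s' := PySem.Chars.lower s.toList
  let w' := PySem.Chars.lower w.toList
  -- for c in s: new_s += ' ' if c in delimiters else c   (c.replace(c,' ') on a 1-char c is ' ')
  let new_s := s'.foldl (fun acc c => if c ∈ pvDelims then acc ++ [' '] else acc ++ [c]) []
  -- list_s = new_s.split(); return w in list_s
  decide (w' ∈ PySem.Chars.split₀ new_s)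

-- ===== PORT B =====
-- token boundary: delimiter character or whitespace
def pvIsBound (c : Char) : Bool := c ∈ pvDelims || PySem.Chars.isspace c

-- the streaming loop of Source B: cur is the current delimiter-free run
def pvAltLoop (w : List Char) : List Char → List Char → Bool
  | cur, [] => !cur.isEmpty && cur == w
  | cur, c :: rest =>
      if pvIsBound c then
        if !cur.isEmpty && cur == w then true else pvAltLoop w [] rest
      else
        pvAltLoop w (cur ++ [c]) rest

def contains2_alt (s : String) (w : String) : Bool :=
  pvAltLoop (PySem.Chars.lower w.toList) [] (PySem.Chars.lower s.toList)

-- ===== PRECONDITION & SPEC =====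
def Spec_contains2 (s : String) (w : String) (out : Bool) : Prop := out = contains2_alt s w
instance (s : String) (w : String) (out : Bool) : Decidable (Spec_contains2 s w out) := by unfold Spec_contains2; infer_instance

-- ===== CLAIM (what is proved, stated in full; the proofs are below) =====
def Claim_equal_contains2 : Prop := ∀ (s : String) (w : String), Dom_contains2 s w → Spec_contains2 s w (contains2 s w)

-- ===== LEMMAS AND PROOFS =====

-- A's per-character replacement, as a function
def pvRepl (c : Char) : Char := if c ∈ pvDelims then ' ' else c

theorem pvFoldl_eq_map (cs acc : List Char) :
    cs.foldl (fun acc c => if c ∈ pvDelims then acc ++ [' '] else acc ++ [c]) acc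
      = acc ++ cs.map pvRepl := by
  induction cs generalizing acc with
  | nil => simp
  | cons c rest ih =>
      simp only [List.foldl_cons, List.map_cons, ih, pvRepl]
      split_ifs <;> simp

theorem pvIsspace_repl (c : Char) : PySem.Chars.isspace (pvRepl c) = pvIsBound c := by
  unfold pvRepl pvIsBound
  split_ifs with h
  · simp [h]; decide
  · simp [h]

theorem pvKey (w : List Char) (cs : List Char) : ∀ (cur : List Char) (acc : List (List Char)),
    decide (w ∈ PySem.Chars.split₀.go (cs.map pvRepl) cur acc)
      = (decide (w ∈ acc) || pvAltLoop w cur.reverse cs) := by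
  induction cs with
  | nil =>
      intro cur acc
      simp only [List.map_nil, PySem.Chars.split₀.go, pvAltLoop]
      by_cases hc : cur = []
      · subst hc; simp
      · have h1 : cur.isEmpty = false := by simpa [List.isEmpty_iff] using hc
        have h2 : cur.reverse.isEmpty = false := by simpa [List.isEmpty_iff] using hc
        simp only [h1, h2, Bool.false_eq_true, if_false, Bool.not_false, Bool.true_and]
        by_cases hw : cur.reverse = w
        · simp [hw]
        · have : (cur.reverse == w) = false := by simpa using hw
          simp [this, Ne.symm hw]
  | cons c rest ih =>
      intro cur acc
      simp only [List.map_cons, PySem.Chars.split₀.go, pvIsspace_repl, pvAltLoop]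
      by_cases hb : pvIsBound c = true
      · simp only [hb, if_true]
        by_cases hc : cur = []
        · subst hc
          have := ih [] acc
          simpa using this
        · have h1 : cur.isEmpty = false := by simpa [List.isEmpty_iff] using hc
          have h2 : cur.reverse.isEmpty = false := by simpa [List.isEmpty_iff] using hc
          simp only [h1, h2, Bool.false_eq_true, if_false, Bool.not_false, Bool.true_and]
          rw [ih [] (cur.reverse :: acc)]
          by_cases hw : cur.reverse = w
          · have : (cur.reverse == w) = true := by simpa using hw
            simp [hw]
          · have : (cur.reverse == w) = false := by simpa using hw
            simp [this, Ne.symm hw]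
      · have hb' : pvIsBound c = false := by simpa using hb
        have hd : c ∉ pvDelims := by
          intro hmem
          simp [pvIsBound, hmem] at hb'
        have hr : pvRepl c = c := by simp [pvRepl, hd]
        simp only [hb', Bool.false_eq_true, if_false, hr]
        have := ih (c :: cur) acc
        simpa using this

theorem contains2_eq (s w : String) : contains2 s w = contains2_alt s w := by
  unfold contains2 contains2_alt
  simp only [pvFoldl_eq_map, List.nil_append]
  have := pvKey (PySem.Chars.lower w.toList) (PySem.Chars.lower s.toList) [] []
  simpa [PySem.Chars.split₀] using this

-- ===== VERDICT (by name: the statement is the Claim_ definition above) =====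
theorem contains2_spec : Claim_equal_contains2 := by
  intro s w _
  unfold Spec_contains2
  exact contains2_eq s w
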